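-- pv_equiv track=rewrite | github.com/ditisaxena1/dsa_problem_solving | Problems/numbers_and_lists/display_num_occuring_3_consecutive_time.py | num_occuring_3_consecutive_times
-- ===== SOURCE A (Python) =====
-- def num_occuring_3_consecutive_times(lst):
--     count = 1
--     index = 0
--     new_list = []
--
--     while index < len(lst)-1:
--         if lst[index] == lst[index+1]:
--             count += 1
--             index += 1
--
--         else:
--             if count >= 3:
--                 new_list.append(lst[index])
--             count = 1
--             index = index + 1
--
--     if count >= 3:
--         new_list.append(lst[index])
--
--     return new_list
-- ===== SOURCE B (Python) =====
-- def num_occuring_3_consecutive_times(lst):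
--     # Phase 1: split lst into (value, run_length) pairs for consecutive runs.
--     runs = []
--     for x in lst:
--         if runs and runs[-1][0] == x:
--             runs[-1] = (x, runs[-1][1] + 1)
--         else:
--             runs.append((x, 1))
--     # Phase 2: keep the value of each run of length >= 3, in order.
--     return [v for v, n in runs if n >= 3]
-- ===== Notes on version B (the rewrite author's own statement) =====
-- stated objective: alternative
-- what changed: B first compresses the list into (value, run-length) pairs in one pass and then filters runs of length >= 3, replacing A's count/index while-loop state machine with a group-then-filter two-phase structure.
import Mathlib
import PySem

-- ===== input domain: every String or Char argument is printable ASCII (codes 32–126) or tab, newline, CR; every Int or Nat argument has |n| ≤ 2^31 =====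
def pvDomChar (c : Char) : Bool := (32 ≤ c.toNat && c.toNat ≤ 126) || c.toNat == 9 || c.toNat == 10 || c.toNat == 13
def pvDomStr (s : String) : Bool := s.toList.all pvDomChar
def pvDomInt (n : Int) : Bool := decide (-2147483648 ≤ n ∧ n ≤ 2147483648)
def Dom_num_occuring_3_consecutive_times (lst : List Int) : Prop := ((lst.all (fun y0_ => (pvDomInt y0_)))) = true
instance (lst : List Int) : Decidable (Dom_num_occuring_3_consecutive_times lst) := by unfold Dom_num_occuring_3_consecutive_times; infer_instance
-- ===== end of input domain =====

-- ===== PORT A =====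
-- A changes nothing: B is an exact, structurally different re-implementation (group runs, then filter).
-- A's while loop ported as recursion on the remaining index range; fuel = lst.length - index is a
-- pure totality guard (the 0 case is reached only when the loop body would never run). Every index
-- accessed is in range, so getD _ 0 is exact there.
def pvALoop (lst : List Int) (fuel : Nat) (count : Int) (index : Nat) (newList : List Int) : List Int :=
  match fuel with
  | 0 => newList
  | fuel + 1 =>
    if index < lst.length - 1 then
      if lst.getD index 0 == lst.getD (index + 1) 0 then
        pvALoop lst fuel (count + 1) (index + 1) newList
      else
        if count ≥ 3 then pvALoop lst fuel 1 (index + 1) (newList ++ [lst.getD index 0])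
        else pvALoop lst fuel 1 (index + 1) newList
    else
      if count ≥ 3 then newList ++ [lst.getD index 0] else newList

def num_occuring_3_consecutive_times (lst : List Int) : List Int :=
  pvALoop lst lst.length 1 0 []

-- ===== PORT B =====
-- Phase 1 step: extend the current (last) run or start a new one.
-- The fold keeps the run list in REVERSE (Lean lists prepend where Source B appends/updates runs[-1]);
-- pvProcess reverses it back before the filter/map comprehension, so the runs are the same.
def pvAddRun (runs : List (Int × Int)) (x : Int) : List (Int × Int) :=
  match runs with
  | (v, n) :: rest => if v == x then (v, n + 1) :: rest else (x, 1) :: (v, n) :: rest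
  | [] => [(x, 1)]

-- Phase 2: the comprehension [v for v, n in runs if n >= 3]
def pvProcess (runs : List (Int × Int)) : List Int :=
  (runs.reverse.filter (fun p => 3 ≤ p.2)).map (fun p => p.1)

def num_occuring_3_consecutive_times_alt (lst : List Int) : List Int :=
  pvProcess (lst.foldl pvAddRun [])

-- ===== PRECONDITION & SPEC =====
def Spec_num_occuring_3_consecutive_times (lst : List Int) (out : List Int) : Prop := out = num_occuring_3_consecutive_times_alt lst
instance (lst : List Int) (out : List Int) : Decidable (Spec_num_occuring_3_consecutive_times lst out) := by unfold Spec_num_occuring_3_consecutive_times; infer_instance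

-- ===== CLAIM (what is proved, stated in full; the proofs are below) =====
def Claim_equal_num_occuring_3_consecutive_times : Prop := ∀ (lst : List Int), Dom_num_occuring_3_consecutive_times lst → Spec_num_occuring_3_consecutive_times lst (num_occuring_3_consecutive_times lst)

-- ===== LEMMAS AND PROOFS =====

-- Common reference function: the filtered run values of xs, the head run carrying count c.
def pvSpecRuns : List Int → Int → List Int
  | [], _ => []
  | [x], c => if c ≥ 3 then [x] else []
  | x :: y :: rest, c =>
      if x == y then pvSpecRuns (y :: rest) (c + 1)
      else (if c ≥ 3 then [x] else []) ++ pvSpecRuns (y :: rest) 1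

lemma pvALoop_eq_spec (lst : List Int) : ∀ (fuel : Nat) (c : Int) (i : Nat) (acc : List Int),
    i < lst.length → fuel = lst.length - i →
    pvALoop lst fuel c i acc = acc ++ pvSpecRuns (lst.drop i) c := by
  intro fuel
  induction fuel with
  | zero => intro c i acc h hf; omega
  | succ f ihf =>
      intro c i acc h hf
      have hd : lst.drop i = lst[i] :: lst.drop (i + 1) := List.drop_eq_getElem_cons h
      by_cases hlt : i < lst.length - 1
      · have h1 : i + 1 < lst.length := by omega
        have hf1 : f = lst.length - (i + 1) := by omega
        have hd1 : lst.drop (i + 1) = lst[i + 1] :: lst.drop (i + 2) := List.drop_eq_getElem_cons h1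
        rw [pvALoop, if_pos hlt, List.getD_eq_getElem lst 0 h, List.getD_eq_getElem lst 0 h1]
        rw [hd, hd1, pvSpecRuns]
        by_cases he : lst[i] == lst[i + 1]
        · rw [if_pos he, if_pos he, ihf (c + 1) (i + 1) acc h1 hf1, hd1]
        · rw [if_neg he, if_neg he]
          by_cases hc : c ≥ 3
          · rw [if_pos hc, if_pos hc, ihf 1 (i + 1) _ h1 hf1, hd1, List.append_assoc]
          · rw [if_neg hc, if_neg hc, ihf 1 (i + 1) acc h1 hf1, hd1, List.nil_append]
      · have hnil : lst.drop (i + 1) = [] := by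
          apply List.drop_eq_nil_of_le; omega
        rw [pvALoop, if_neg hlt, List.getD_eq_getElem lst 0 h, hd, hnil, pvSpecRuns]
        split <;> simp

lemma pvProcess_cons (x : Int) (c : Int) (r : List (Int × Int)) :
    pvProcess ((x, c) :: r) = pvProcess r ++ (if c ≥ 3 then [x] else []) := by
  simp only [pvProcess, List.reverse_cons, List.filter_append, List.map_append]
  split <;> simp_all

lemma pvFoldl_eq_spec (xs : List Int) : ∀ (x : Int) (c : Int) (r : List (Int × Int)),
    pvProcess (xs.foldl pvAddRun ((x, c) :: r)) = pvProcess r ++ pvSpecRuns (x :: xs) c := by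
  induction xs with
  | nil =>
      intro x c r
      simp [List.foldl, pvProcess_cons, pvSpecRuns]
  | cons y ys ih =>
      intro x c r
      rw [List.foldl_cons, pvAddRun]
      by_cases he : x == y
      · have hxy : x = y := beq_iff_eq.mp he
        rw [if_pos he, ih x (c + 1) r, pvSpecRuns, if_pos he, hxy]
      · rw [if_neg he, ih, pvProcess_cons, pvSpecRuns, if_neg he, List.append_assoc]

-- ===== VERDICT (by name: the statement is the Claim_ definition above) =====
theorem num_occuring_3_consecutive_times_spec : Claim_equal_num_occuring_3_consecutive_times := by
  intro lst _
  unfold Spec_num_occuring_3_consecutive_times num_occuring_3_consecutive_times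
    num_occuring_3_consecutive_times_alt
  cases lst with
  | nil => simp [pvALoop, pvProcess]
  | cons x xs =>
      rw [pvALoop_eq_spec (x :: xs) (x :: xs).length 1 0 [] (by simp) (by simp), List.drop_zero, List.nil_append]
      rw [List.foldl_cons]
      show pvSpecRuns (x :: xs) 1 = pvProcess (xs.foldl pvAddRun [(x, 1)])
      rw [pvFoldl_eq_spec xs x 1 []]
      simp [pvProcess]
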